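-- pv_equiv track=rewrite | github.com/Stoick643/Pilgrimage | main.py | extract_text_with_cities
-- ===== SOURCE A (Python) =====
-- def extract_text_with_cities(text):
--     # return list of tuples as
--     # [  ("Florence", "Text block for Florence"),  ("Siena", "Text block for Siena"),  ...]
--     result = []  # To store tuples of (city, content)
--     lines = text.split('\n')  # Split the input text into lines
--     current_block = []  # Temporary list to collect lines between "&&&" markers
--     current_city = None  # Variable to store the current city name
--
--     for line in lines:
--         line = line.strip()  # Remove leading/trailing spaces
--         if line.startswith('&&&'):
--             if current_block and current_city:
--                 result.append(
--                     (current_city,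
--                      '\n'.join(current_block)))  # Add city and block to result
--                 current_block = []  # Reset the block for next section
--             current_city = line[3:].strip()  # Update city name
--         else:
--             if current_city:
--                 current_block.append(
--                     line)  # Collect lines for the current city
--
--     if current_block and current_city:
--         result.append((current_city,
--                        '\n'.join(current_block)))  # Add the last block if any
--
--     return result
-- ===== SOURCE B (Python) =====
-- def extract_text_with_cities(text):
--     lines = [ln.strip() for ln in text.split('\n')]
--     marks = [i for i, ln in enumerate(lines) if ln.startswith('&&&')]
--     out = []
--     for i, end in zip(marks, marks[1:] + [len(lines)]):
--         city = lines[i][3:].strip()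
--         block = lines[i + 1:end]
--         if city and block:
--             out.append((city, '\n'.join(block)))
--     return out
-- ===== Notes on version B (the rewrite author's own statement) =====
-- stated objective: alternative
-- what changed: A's single accumulate-and-flush state machine (current_city/current_block mutated per line) is replaced by an index-then-slice pass: strip all lines once, collect the indices of the marker lines, and emit (city, joined slice) for each marker from the slice of lines up to the next marker index.
import Mathlib
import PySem

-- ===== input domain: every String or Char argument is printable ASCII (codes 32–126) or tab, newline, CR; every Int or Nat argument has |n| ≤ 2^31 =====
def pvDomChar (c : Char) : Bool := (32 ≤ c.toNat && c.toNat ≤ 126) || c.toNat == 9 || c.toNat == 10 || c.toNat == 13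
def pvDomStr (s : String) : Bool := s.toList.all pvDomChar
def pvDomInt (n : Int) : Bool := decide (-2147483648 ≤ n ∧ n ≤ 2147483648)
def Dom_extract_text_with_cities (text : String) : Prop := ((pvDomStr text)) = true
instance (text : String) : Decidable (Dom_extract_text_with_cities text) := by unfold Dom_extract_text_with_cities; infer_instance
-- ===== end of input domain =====

-- B replaces A's accumulate-and-flush state machine by a marker-index-then-slice pass (alternative decomposition, same cost).

-- shared transliteration helpers: line.startswith('&&&'), line[3:].strip(), Python truthiness of current_city
def pvMarker (s : String) : Bool := PySem.Str.startswith s "&&&"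
def pvCity (s : String) : String := PySem.Str.strip (PySem.Str.slice s (some 3) none)
def pvTruthy (c : Option String) : Bool := match c with | none => false | some s => !(s == "")

-- ===== PORT A =====
def extract_text_with_cities (text : String) : List (String × String) :=
  let lines := (PySem.Str.split? text "\n").getD []
  let st := lines.foldl
    (fun (st : List (String × String) × List String × Option String) line0 =>
      let line := PySem.Str.strip line0
      if pvMarker line then
        let st2 := if (!st.2.1.isEmpty) && pvTruthy st.2.2
          then (st.1 ++ [(st.2.2.getD "", PySem.Str.join "\n" st.2.1)], ([] : List String))
          else (st.1, st.2.1)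
        (st2.1, st2.2, some (pvCity line))
      else
        if pvTruthy st.2.2 then (st.1, st.2.1 ++ [line], st.2.2) else st)
    ([], [], none)
  if (!st.2.1.isEmpty) && pvTruthy st.2.2
  then st.1 ++ [(st.2.2.getD "", PySem.Str.join "\n" st.2.1)]
  else st.1

-- ===== PORT B =====
def extract_text_with_cities_alt (text : String) : List (String × String) :=
  let lines := ((PySem.Str.split? text "\n").getD []).map PySem.Str.strip
  let marks := ((PySem.List.enumerate lines).filter (fun p => pvMarker p.2)).map (·.1)
  let pairs := marks.zip (PySem.List.slice marks (some 1) none ++ [PySem.List.len lines])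
  pairs.foldl (fun out p =>
      let city := pvCity ((PySem.List.pyGet? lines p.1).getD "")
      let block := PySem.List.slice lines (some (p.1 + 1)) (some p.2)
      if (!(city == "")) && (!block.isEmpty)
      then out ++ [(city, PySem.Str.join "\n" block)] else out)
    []

-- ===== PRECONDITION & SPEC =====
def Spec_extract_text_with_cities (text : String) (out : List (String × String)) : Prop := out = extract_text_with_cities_alt text
instance (text : String) (out : List (String × String)) : Decidable (Spec_extract_text_with_cities text out) := by unfold Spec_extract_text_with_cities; infer_instance

-- ===== CLAIM (what is proved, stated in full; the proofs are below) =====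
def Claim_equal_extract_text_with_cities : Prop := ∀ (text : String), Dom_extract_text_with_cities text → Spec_extract_text_with_cities text (extract_text_with_cities text)

-- ===== LEMMAS AND PROOFS =====

-- common recursive description of the grouping both programs compute on the stripped lines
def pvGo : List String → List (String × String)
  | [] => []
  | l :: ls =>
    if pvMarker l then
      (if (!(pvCity l == "")) && (!(ls.takeWhile (fun x => !pvMarker x)).isEmpty)
       then [(pvCity l, PySem.Str.join "\n" (ls.takeWhile (fun x => !pvMarker x)))] else [])
      ++ pvGo (ls.dropWhile (fun x => !pvMarker x))
    else pvGo ls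
termination_by ls => ls.length
decreasing_by
  · exact Nat.lt_succ_of_le (ls.length_dropWhile_le _)
  · exact Nat.lt_succ_self _

lemma pvGo_skip (ls : List String) : pvGo (ls.dropWhile (fun x => !pvMarker x)) = pvGo ls := by
  induction ls with
  | nil => rfl
  | cons l ls ih =>
    by_cases hm : pvMarker l
    · simp [hm]
    · simp only [List.dropWhile_cons]
      simp [hm, ih, pvGo]

-- A-side: the loop body (on an already-stripped line) and the final flush
def pvStepA (st : List (String × String) × List String × Option String) (line : String) :
    List (String × String) × List String × Option String :=
  if pvMarker line then
    let st2 := if (!st.2.1.isEmpty) && pvTruthy st.2.2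
      then (st.1 ++ [(st.2.2.getD "", PySem.Str.join "\n" st.2.1)], ([] : List String))
      else (st.1, st.2.1)
    (st2.1, st2.2, some (pvCity line))
  else
    if pvTruthy st.2.2 then (st.1, st.2.1 ++ [line], st.2.2) else st

def pvFin (st : List (String × String) × List String × Option String) : List (String × String) :=
  if (!st.2.1.isEmpty) && pvTruthy st.2.2
  then st.1 ++ [(st.2.2.getD "", PySem.Str.join "\n" st.2.1)]
  else st.1

def pvK (city : Option String) (blk ls : List String) : List (String × String) :=
  if pvTruthy city then
    (if (blk ++ ls.takeWhile (fun x => !pvMarker x)).isEmpty then []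
     else [(city.getD "", PySem.Str.join "\n" (blk ++ ls.takeWhile (fun x => !pvMarker x)))])
    ++ pvGo (ls.dropWhile (fun x => !pvMarker x))
  else pvGo ls

lemma pvK_marker (l : String) (ls : List String) (hm : pvMarker l = true) :
    pvK (some (pvCity l)) [] ls = pvGo (l :: ls) := by
  by_cases hc : pvCity l = ""
  · simp [pvK, pvTruthy, hc, pvGo, hm, pvGo_skip]
  · have hc' : (pvCity l == "") = false := by simp [hc]
    simp only [pvK, pvTruthy, hc', Bool.not_false, if_true, pvGo, hm, List.nil_append]
    by_cases ht : (ls.takeWhile (fun x => !pvMarker x)).isEmpty <;> simp [ht]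

lemma pvA_inv (ls : List String) :
    ∀ (res : List (String × String)) (blk : List String) (city : Option String),
      (pvTruthy city = false → blk = []) →
      pvFin (ls.foldl pvStepA (res, blk, city)) = res ++ pvK city blk ls := by
  induction ls with
  | nil =>
    intro res blk city h
    by_cases ht : pvTruthy city = true
    · simp only [List.foldl_nil, pvFin, pvK, ht]
      by_cases hb : blk.isEmpty <;> simp_all [List.isEmpty_iff, pvGo]
    · simp only [Bool.not_eq_true] at ht
      simp [pvFin, pvK, ht, h ht, pvGo]
  | cons l ls ih =>
    intro res blk city h
    simp only [List.foldl_cons]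
    by_cases hm : pvMarker l
    · by_cases hf : ((!blk.isEmpty) && pvTruthy city) = true
      · rw [Bool.and_eq_true] at hf
        obtain ⟨hb', ht⟩ := hf
        have hb : blk ≠ [] := by simpa using hb'
        have hstep : pvStepA (res, blk, city) l
            = (res ++ [(city.getD "", PySem.Str.join "\n" blk)], [], some (pvCity l)) := by
          simp [pvStepA, hm, hb', ht]
        rw [hstep, ih _ _ _ (by intro hx; rfl), pvK_marker l ls hm]
        simp [pvK, ht, hm, hb]
      · have hb : blk = [] := by
          by_cases ht : pvTruthy city = true
          · simp [ht] at hf; simpa [List.isEmpty_iff] using hf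
          · exact h (by simpa using ht)
        subst hb
        have hstep : pvStepA (res, [], city) l = (res, [], some (pvCity l)) := by
          simp [pvStepA, hm]
        rw [hstep, ih _ _ _ (by intro hx; rfl), pvK_marker l ls hm]
        by_cases ht : pvTruthy city = true
        · simp [pvK, ht, hm, pvGo]
        · simp only [Bool.not_eq_true] at ht
          simp [pvK, ht, hm, pvGo]
    · by_cases ht : pvTruthy city = true
      · have hstep : pvStepA (res, blk, city) l = (res, blk ++ [l], city) := by
          simp [pvStepA, hm, ht]
        rw [hstep, ih _ _ _ (by intro hx; simp [hx] at ht)]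
        simp [pvK, ht, hm]
      · simp only [Bool.not_eq_true] at ht
        have hstep : pvStepA (res, blk, city) l = (res, blk, city) := by
          simp [pvStepA, hm, ht]
        rw [hstep, ih _ _ _ h]
        simp [pvK, ht, pvGo, hm]

lemma pvA_eq_go (text : String) :
    extract_text_with_cities text
      = pvGo (((PySem.Str.split? text "\n").getD []).map PySem.Str.strip) := by
  have h1 : extract_text_with_cities text
      = pvFin (((PySem.Str.split? text "\n").getD []).foldl
          (fun st l0 => pvStepA st (PySem.Str.strip l0)) ([], [], none)) := rfl
  rw [h1, ← List.foldl_map, pvA_inv _ _ _ _ (fun _ => rfl)]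
  simp [pvK, pvTruthy]

-- B-side: emitted segment of one (marker, next-marker-or-end) pair, and marker indices from a start
def pvEmit (L : List String) (p : Int × Int) : List (String × String) :=
  let city := pvCity ((PySem.List.pyGet? L p.1).getD "")
  let block := PySem.List.slice L (some (p.1 + 1)) (some p.2)
  if (!(city == "")) && (!block.isEmpty) then [(city, PySem.Str.join "\n" block)] else []

def pvMarksFrom (ls : List String) (s : Int) : List Int :=
  ((PySem.List.enumerate ls s).filter (fun p => pvMarker p.2)).map (·.1)

lemma pvMarksFrom_nil (s : Int) : pvMarksFrom [] s = [] := by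
  simp [pvMarksFrom, PySem.List.enumerate_nil]

lemma pvMarksFrom_cons (l : String) (ls : List String) (s : Int) :
    pvMarksFrom (l :: ls) s
      = if pvMarker l then s :: pvMarksFrom ls (s + 1) else pvMarksFrom ls (s + 1) := by
  by_cases hm : pvMarker l <;>
    simp [pvMarksFrom, PySem.List.enumerate_cons, hm]

lemma pvMarksFrom_append (a b : List String) (s : Int) :
    pvMarksFrom (a ++ b) s = pvMarksFrom a s ++ pvMarksFrom b (s + a.length) := by
  simp [pvMarksFrom, PySem.List.enumerate_append, List.filter_append]

lemma pvMarksFrom_nomark (a : List String) (s : Int) (h : ∀ x ∈ a, pvMarker x = false) :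
    pvMarksFrom a s = [] := by
  induction a generalizing s with
  | nil => exact pvMarksFrom_nil s
  | cons x a ih =>
    rw [pvMarksFrom_cons]
    simp [h x (by simp), ih _ (fun y hy => h y (by simp [hy]))]

lemma pvDropWhile_head {α : Type} (p : α → Bool) (l : List α) (d : α) (dw : List α)
    (h : l.dropWhile p = d :: dw) : p d = false := by
  induction l with
  | nil => simp at h
  | cons x xs ih =>
    rw [List.dropWhile_cons] at h
    by_cases hx : p x
    · exact ih (by simpa [hx] using h)
    · rw [if_neg hx] at h
      injection h with h1 h2
      rw [← h1]
      simpa using hx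

lemma pvSlice_seg (pre : List String) (l : String) (ls' : List String) (k : Nat) :
    PySem.List.slice (pre ++ l :: ls') (some ((pre.length : Int) + 1))
        (some ((pre.length : Int) + 1 + (k : Int))) = ls'.take k := by
  have h1 : ((pre.length : Int) + 1) = (((pre.length + 1 : Nat)) : Int) := by push_cast; ring
  have h2 : ((pre.length : Int) + 1 + (k : Int)) = (((pre.length + 1 + k : Nat)) : Int) := by
    push_cast; ring
  rw [h2, h1, PySem.List.slice_natCast]
  have h3 : pre ++ l :: ls' = (pre ++ [l]) ++ ls' := by simp
  have h4 : pre.length + 1 = (pre ++ [l]).length := by simp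
  rw [h3, h4, List.drop_left]
  have h5 : (pre ++ [l]).length + k - (pre ++ [l]).length = k := Nat.add_sub_cancel_left _ _
  rw [h5]

lemma pvB_main : ∀ (n : Nat) (ls pre : List String), ls.length ≤ n →
    ((pvMarksFrom ls pre.length).zip
        ((pvMarksFrom ls pre.length).drop 1 ++ [PySem.List.len (pre ++ ls)])).flatMap
      (pvEmit (pre ++ ls)) = pvGo ls := by
  intro n
  induction n with
  | zero =>
    intro ls pre h
    cases ls with
    | nil => simp [pvMarksFrom_nil, pvGo]
    | cons a b => simp at h
  | succ n ih =>
    intro ls pre h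
    cases ls with
    | nil => simp [pvMarksFrom_nil, pvGo]
    | cons l ls' =>
      rw [pvMarksFrom_cons]
      by_cases hm : pvMarker l
      · rw [if_pos hm]
        have hsplit : ls'.takeWhile (fun x => !pvMarker x) ++ ls'.dropWhile (fun x => !pvMarker x) = ls' :=
          List.takeWhile_append_dropWhile
        have hnomark : ∀ x ∈ ls'.takeWhile (fun x => !pvMarker x), pvMarker x = false :=
          fun x hx => by simpa using List.mem_takeWhile_imp hx
        have hmarks : pvMarksFrom ls' ((pre.length : Int) + 1)
            = pvMarksFrom (ls'.dropWhile (fun x => !pvMarker x))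
                ((pre.length : Int) + 1 + ((ls'.takeWhile (fun x => !pvMarker x)).length : Int)) := by
          conv_lhs => rw [← hsplit]
          rw [pvMarksFrom_append, pvMarksFrom_nomark _ _ hnomark, List.nil_append]
        rw [hmarks]
        have hget : PySem.List.pyGet? (pre ++ l :: ls') ((pre.length : Nat) : Int) = some l :=
          PySem.List.pyGet?_append_length _ _ _
        cases hdw : ls'.dropWhile (fun x => !pvMarker x) with
        | nil =>
          have htw : ls'.takeWhile (fun x => !pvMarker x) = ls' := by
            have h0 := hsplit
            rw [hdw] at h0
            simpa using h0
          rw [pvMarksFrom_nil]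
          have hlen : PySem.List.len (pre ++ l :: ls')
              = (pre.length : Int) + 1 + (ls'.length : Int) := by
            simp only [PySem.List.len_eq, List.length_append, List.length_cons]
            push_cast
            ring
          have hslice := pvSlice_seg pre l ls' ls'.length
          rw [List.take_length] at hslice
          rw [hlen]
          simp only [List.drop_one, List.tail_cons, List.nil_append, List.zip_cons_cons,
            List.zip_nil_left, List.flatMap_cons, List.flatMap_nil, List.append_nil]
          dsimp only [pvEmit]
          rw [hget]
          simp only [Option.getD_some]
          rw [hslice]
          conv_rhs => rw [pvGo]
          rw [if_pos hm, htw, hdw]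
          simp [pvGo]
        | cons d dw' =>
          have hd : pvMarker d = true := by
            have h0 := pvDropWhile_head (fun x => !pvMarker x) ls' d dw' hdw
            simpa using h0
          rw [pvMarksFrom_cons, if_pos hd]
          have htake : ls'.take (ls'.takeWhile (fun x => !pvMarker x)).length
              = ls'.takeWhile (fun x => !pvMarker x) :=
            (List.prefix_iff_eq_take.mp (List.takeWhile_prefix _)).symm
          have hslice : PySem.List.slice (pre ++ l :: ls') (some ((pre.length : Int) + 1))
              (some ((pre.length : Int) + 1 + ((ls'.takeWhile (fun x => !pvMarker x)).length : Int)))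
              = ls'.takeWhile (fun x => !pvMarker x) := by
            rw [pvSlice_seg pre l ls' _, htake]
          have hdwlen : (d :: dw').length ≤ n := by
            have h1 : (ls'.dropWhile (fun x => !pvMarker x)).length ≤ ls'.length :=
              ls'.length_dropWhile_le _
            rw [hdw] at h1
            simp only [List.length_cons] at h h1 ⊢
            omega
          have hih := ih (d :: dw') (pre ++ l :: ls'.takeWhile (fun x => !pvMarker x)) hdwlen
          have hpre' : (((pre ++ l :: ls'.takeWhile (fun x => !pvMarker x)).length : Nat) : Int)
              = (pre.length : Int) + 1 + ((ls'.takeWhile (fun x => !pvMarker x)).length : Int) := by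
            simp only [List.length_append, List.length_cons]
            push_cast
            ring
          have hfull' : (pre ++ l :: ls'.takeWhile (fun x => !pvMarker x)) ++ (d :: dw')
              = pre ++ l :: ls' := by
            conv_rhs =>
              rw [show ls' = ls'.takeWhile (fun x => !pvMarker x) ++ ls'.dropWhile (fun x => !pvMarker x) from hsplit.symm, hdw]
            simp
          rw [hpre', hfull', pvMarksFrom_cons, if_pos hd] at hih
          simp only [List.drop_one, List.tail_cons, List.cons_append, List.zip_cons_cons,
            List.flatMap_cons] at hih ⊢
          rw [hih]
          dsimp only [pvEmit]
          rw [hget]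
          simp only [Option.getD_some]
          rw [hslice]
          conv_rhs => rw [pvGo]
          rw [if_pos hm, hdw]
      · rw [if_neg hm]
        have hcast : ((pre.length : Int) + 1) = (((pre ++ [l]).length : Nat) : Int) := by
          simp
        have hlen' : ls'.length ≤ n := by
          simp only [List.length_cons] at h
          omega
        rw [hcast, show pre ++ l :: ls' = (pre ++ [l]) ++ ls' by simp, ih ls' (pre ++ [l]) hlen']
        have hgo : pvGo (l :: ls') = pvGo ls' := by simp [pvGo, hm]
        exact hgo.symm

set_option maxHeartbeats 1000000 in
lemma pvB_core (L : List String) :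
    (((((PySem.List.enumerate L).filter (fun p => pvMarker p.2)).map (·.1)).zip
        (PySem.List.slice (((PySem.List.enumerate L).filter (fun p => pvMarker p.2)).map (·.1)) (some 1) none
          ++ [PySem.List.len L])).foldl
      (fun out p =>
        let city := pvCity ((PySem.List.pyGet? L p.1).getD "")
        let block := PySem.List.slice L (some (p.1 + 1)) (some p.2)
        if (!(city == "")) && (!block.isEmpty)
        then out ++ [(city, PySem.Str.join "\n" block)] else out) [])
    = pvGo L := by
  have hstep : (fun (out : List (String × String)) (p : Int × Int) =>
      let city := pvCity ((PySem.List.pyGet? L p.1).getD "")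
      let block := PySem.List.slice L (some (p.1 + 1)) (some p.2)
      if (!(city == "")) && (!block.isEmpty)
      then out ++ [(city, PySem.Str.join "\n" block)] else out)
      = (fun out p => out ++ pvEmit L p) := by
    funext out p
    by_cases hc : ((!(pvCity ((PySem.List.pyGet? L p.1).getD "") == ""))
        && (!(PySem.List.slice L (some (p.1 + 1)) (some p.2)).isEmpty)) = true
    · simp [pvEmit, hc]
    · simp only [Bool.not_eq_true] at hc
      simp [pvEmit, hc]
  rw [hstep, PySem.List.foldl_append_eq_flatMap, PySem.List.slice_from_one, ← List.drop_one,
    List.nil_append]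
  have hmain := pvB_main L.length L [] (le_refl _)
  simpa [pvMarksFrom] using hmain

set_option maxHeartbeats 1000000 in
lemma pvB_eq_go (text : String) :
    extract_text_with_cities_alt text
      = pvGo (((PySem.Str.split? text "\n").getD []).map PySem.Str.strip) := by
  exact pvB_core (((PySem.Str.split? text "\n").getD []).map PySem.Str.strip)

-- ===== VERDICT (by name: the statement is the Claim_ definition above) =====
theorem extract_text_with_cities_spec : Claim_equal_extract_text_with_cities := by
  intro text _
  unfold Spec_extract_text_with_cities
  rw [pvA_eq_go, pvB_eq_go]
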